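-- pv_equiv track=rewrite | github.com/Zhanbingli/my_ebooks_YC | src/ebook_pipeline/polish.py | add_subheadings
-- ===== SOURCE A (Python) =====
-- from typing import Iterable, List, Optional, Tuple
--
-- def add_subheadings(paragraphs: List[str]) -> List[str]:
--     if len(paragraphs) < 6:
--         return paragraphs
--     headings = [
--         "## Introduction",
--         "## Key Ideas",
--         "## Technical Insights",
--         "## Applications",
--         "## Conclusion",
--     ]
--     sections = min(len(headings), max(2, min(5, len(paragraphs) // 6)))
--     heads = headings[:sections]
--     result: List[str] = []
--     total = len(paragraphs)
--     for idx, heading in enumerate(heads):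
--         start = (total * idx) // sections
--         end = (total * (idx + 1)) // sections
--         if idx == 0:
--             result.append(heading)
--         else:
--             result.append("")
--             result.append(heading)
--         result.extend(paragraphs[start:end])
--     return result
-- ===== SOURCE B (Python) =====
-- def add_subheadings(paragraphs):
--     if len(paragraphs) < 6:
--         return paragraphs
--     headings = [
--         "## Introduction",
--         "## Key Ideas",
--         "## Technical Insights",
--         "## Applications",
--         "## Conclusion",
--     ]
--     total = len(paragraphs)
--     sections = max(2, min(5, total // 6))
--     result = []
--     sec = -1
--     nxt = 0
--     for j, para in enumerate(paragraphs):
--         if j == nxt: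
--             if j:
--                 result.append("")
--             sec += 1
--             result.append(headings[sec])
--             nxt = (total * (sec + 1)) // sections
--         result.append(para)
--     return result
-- ===== Notes on version B (the rewrite author's own statement) =====
-- stated objective: alternative
-- what changed: A loops over the headings and slices out each section; B makes a single streaming pass over the paragraphs, carrying (current section, next boundary) state and emitting a blank line plus the next heading whenever the running index reaches the boundary.
import Mathlib
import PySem

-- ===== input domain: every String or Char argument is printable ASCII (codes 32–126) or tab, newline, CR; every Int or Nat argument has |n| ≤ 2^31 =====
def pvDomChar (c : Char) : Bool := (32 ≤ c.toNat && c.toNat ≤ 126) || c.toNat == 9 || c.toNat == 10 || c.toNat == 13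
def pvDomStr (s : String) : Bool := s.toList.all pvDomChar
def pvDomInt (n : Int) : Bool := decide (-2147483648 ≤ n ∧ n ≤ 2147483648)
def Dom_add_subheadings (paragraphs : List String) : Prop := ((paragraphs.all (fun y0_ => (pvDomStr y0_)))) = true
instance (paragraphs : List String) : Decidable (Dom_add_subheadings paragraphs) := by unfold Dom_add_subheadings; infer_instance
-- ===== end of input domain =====

-- B replaces A's loop over headings with per-section slices by a single streaming pass over the
-- paragraphs that emits a heading whenever the running index reaches the next section boundary
-- (alternative decomposition, same cost).

-- ===== PORT A =====
def add_subheadings (paragraphs : List String) : List String :=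
  if paragraphs.length < 6 then paragraphs
  else
    let headings : List String :=
      ["## Introduction", "## Key Ideas", "## Technical Insights", "## Applications", "## Conclusion"]
    let sections : Int :=
      min (headings.length : Int) (max 2 (min 5 (PySem.Int.floordiv (paragraphs.length : Int) 6)))
    let heads := PySem.List.slice headings none (some sections)
    let total : Int := (paragraphs.length : Int)
    (PySem.List.enumerate heads 0).foldl
      (fun result (p : Int × String) =>
        let start := PySem.Int.floordiv (total * p.1) sections
        let end_ := PySem.Int.floordiv (total * (p.1 + 1)) sections
        (if p.1 == 0 then result ++ [p.2] else result ++ ["", p.2])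
          ++ PySem.List.slice paragraphs (some start) (some end_))
      []

-- ===== PORT B =====
-- the loop body of Source B: state = (result, sec, nxt); headings[sec] is always in range on the
-- reachable states (sec < sections ≤ 5 = len(headings)), ported with pyGetD.
def bstep (total sections : Int) (headings : List String) :
    (List String × Int × Int) → (Int × String) → (List String × Int × Int) :=
  fun st p =>
    if p.1 == st.2.2 then
      let res := if p.1 == 0 then st.1 else st.1 ++ [""]
      let sec := st.2.1 + 1
      let res := res ++ [PySem.List.pyGetD headings sec ""]
      let nxt := PySem.Int.floordiv (total * (sec + 1)) sections
      (res ++ [p.2], sec, nxt)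
    else (st.1 ++ [p.2], st.2.1, st.2.2)

def add_subheadings_alt (paragraphs : List String) : List String :=
  if paragraphs.length < 6 then paragraphs
  else
    let headings : List String :=
      ["## Introduction", "## Key Ideas", "## Technical Insights", "## Applications", "## Conclusion"]
    let total : Int := (paragraphs.length : Int)
    let sections : Int := max 2 (min 5 (PySem.Int.floordiv total 6))
    ((PySem.List.enumerate paragraphs 0).foldl (bstep total sections headings) ([], -1, 0)).1

-- ===== PRECONDITION & SPEC =====
def Spec_add_subheadings (paragraphs : List String) (out : List String) : Prop := out = add_subheadings_alt paragraphs
instance (paragraphs : List String) (out : List String) : Decidable (Spec_add_subheadings paragraphs out) := by unfold Spec_add_subheadings; infer_instance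

-- ===== CLAIM (what is proved, stated in full; the proofs are below) =====
def Claim_equal_add_subheadings : Prop := ∀ (paragraphs : List String), Dom_add_subheadings paragraphs → Spec_add_subheadings paragraphs (add_subheadings paragraphs)

-- ===== LEMMAS AND PROOFS =====

theorem bstep_run (t S : Int) (H : List String) :
    ∀ (xs : List String) (j0 : Int) (res : List String) (sec nxt : Int),
      (∀ k : Nat, k < xs.length → j0 + k ≠ nxt) →
      (PySem.List.enumerate xs j0).foldl (bstep t S H) (res, sec, nxt) = (res ++ xs, sec, nxt) := by
  intro xs
  induction xs with
  | nil => intro j0 res sec nxt _; simp [PySem.List.enumerate]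
  | cons x xs ih =>
    intro j0 res sec nxt h
    rw [PySem.List.enumerate_cons]
    have h0 : j0 ≠ nxt := by have := h 0 (by simp); simpa using this
    simp only [List.foldl_cons, bstep, beq_iff_eq, if_neg h0]
    rw [ih (j0 + 1) (res ++ [x]) sec nxt (fun k hk => by
      have := h (k + 1) (by simp; omega); push_cast at this ⊢; omega)]
    simp

theorem bstep_section (t S : Int) (H : List String) (ys : List String) (j0 : Int)
    (res : List String) (sec : Int) (hne : ys ≠ [])
    (hnxt : j0 + (ys.length : Int) ≤ PySem.Int.floordiv (t * (sec + 1 + 1)) S) :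
    (PySem.List.enumerate ys j0).foldl (bstep t S H) (res, sec, j0) =
      ((if j0 == 0 then res else res ++ [""]) ++ [PySem.List.pyGetD H (sec + 1) ""] ++ ys,
        sec + 1, PySem.Int.floordiv (t * (sec + 1 + 1)) S) := by
  obtain ⟨y, ys', rfl⟩ := List.exists_cons_of_ne_nil hne
  rw [PySem.List.enumerate_cons]
  simp only [List.foldl_cons, bstep, beq_self_eq_true, if_pos]
  rw [bstep_run t S H ys' (j0 + 1) _ _ _ (fun k hk => by
    simp only [List.length_cons] at hnxt; push_cast at hnxt ⊢; omega)]
  simp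

def chunkOK (t S : Int) : Int → Nat → List (List String) → Prop
  | _, _, [] => True
  | sec, j0, c :: cs =>
      c ≠ [] ∧ PySem.Int.floordiv (t * (sec + 1 + 1)) S = (j0 : Int) + c.length ∧
        chunkOK t S (sec + 1) (j0 + c.length) cs

def glue (H : List String) : Int → Nat → List (List String) → List String
  | _, _, [] => []
  | sec, j0, c :: cs =>
      (if j0 = 0 then [] else [""]) ++ PySem.List.pyGetD H (sec + 1) "" :: c
        ++ glue H (sec + 1) (j0 + c.length) cs

theorem bstep_chunks (t S : Int) (H : List String) :
    ∀ (cs : List (List String)) (j0 : Nat) (res : List String) (sec : Int),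
      chunkOK t S sec j0 cs →
      (PySem.List.enumerate cs.flatten (j0 : Int)).foldl (bstep t S H) (res, sec, (j0 : Int)) =
        (res ++ glue H sec j0 cs, sec + cs.length,
          if cs.isEmpty then (j0 : Int) else ((j0 : Int) + cs.flatten.length)) := by
  intro cs
  induction cs with
  | nil => intro j0 res sec _; simp [PySem.List.enumerate, glue]
  | cons c cs ih =>
    intro j0 res sec hok
    obtain ⟨hne, hb, hok'⟩ := hok
    rw [List.flatten_cons, PySem.List.enumerate_append, List.foldl_append]
    rw [bstep_section t S H c (j0 : Int) res sec hne (by omega)]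
    rw [hb]
    have hcast : ((j0 : Int) + (c.length : Int)) = ((j0 + c.length : Nat) : Int) := by push_cast; ring
    rw [hcast, ih (j0 + c.length) _ (sec + 1) hok']
    have hj0 : ((j0 : Int) == 0) = decide (j0 = 0) := by
      by_cases hz : j0 = 0 <;> simp [hz] <;> omega
    cases cs with
    | nil => simp [glue, hj0, List.append_assoc]; split_ifs <;> simp
    | cons d ds =>
      simp only [glue, hj0, List.isEmpty_cons, List.flatten_cons, List.length_append,
        Prod.mk.injEq, List.length_cons, Bool.false_eq_true, if_false]
      refine ⟨?_, ?_, ?_⟩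
      · simp only [decide_eq_true_eq]
        by_cases hz : j0 = 0
        · simp [hz, List.append_assoc]
        · simp [hz, List.append_assoc]
      · push_cast; ring
      · push_cast; ring

theorem drop_split {α : Type} (l : List α) (a b : Nat) (hab : a ≤ b) :
    l.drop a = (l.drop a).take (b - a) ++ l.drop b := by
  conv_lhs => rw [← List.take_append_drop (b - a) (l.drop a)]
  rw [List.drop_drop]
  congr 2
  omega

theorem add_subheadings_eq_alt (paragraphs : List String) :
    add_subheadings paragraphs = add_subheadings_alt paragraphs := by
  unfold add_subheadings add_subheadings_alt
  by_cases h : paragraphs.length < 6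
  · simp [h]
  · simp only [if_neg h]
    have hfd : PySem.Int.floordiv (paragraphs.length : Int) 6 = (paragraphs.length : Int) / 6 :=
      PySem.Int.floordiv_eq_ediv_of_pos (by norm_num)
    rw [hfd]
    set n := paragraphs.length with hn
    have h6 : 6 ≤ n := by omega
    have h00 : ((0 : Nat) : Int) = (0 : Int) := by norm_num
    have hs : max 2 (min 5 ((n:Int) / 6)) = 2 ∨ max 2 (min 5 ((n:Int) / 6)) = 3 ∨
        max 2 (min 5 ((n:Int) / 6)) = 4 ∨ max 2 (min 5 ((n:Int) / 6)) = 5 := by omega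
    rcases hs with hv | hv | hv | hv <;> rw [hv]
    -- S = 2
    · have hh : PySem.List.slice (["## Introduction", "## Key Ideas", "## Technical Insights", "## Applications", "## Conclusion"] : List String) none (some 2) = ["## Introduction", "## Key Ideas"] := by decide
      simp only [List.length_cons, List.length_nil]
      norm_num [hh, PySem.List.enumerate]
      have hc1 : ((n : Int) / 2) = ((n / 2 : Nat) : Int) := by omega
      set b1 := n / 2 with hb1
      set c0 := paragraphs.take b1 with hdc0
      set c1 := (paragraphs.drop b1).take (n - b1) with hdc1
      have l0 : c0.length = b1 := by simp [hdc0, hn]; try omega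
      have l1 : c1.length = n - b1 := by simp [hdc1, hn]; try omega
      have hflat : ([c0, c1] : List (List String)).flatten = paragraphs := by
        simp only [List.flatten_cons, List.flatten_nil, List.append_nil]
        rw [hdc0, hdc1, show (paragraphs.drop b1).take (n - b1) = paragraphs.drop b1 from
          List.take_of_length_le (by simp [hn])]
        exact List.take_append_drop b1 paragraphs
      rw [hc1, PySem.List.slice_to_natCast, PySem.List.slice_natCast, ← hdc0]
      conv_rhs => rw [← hflat, ← h00]
      rw [bstep_chunks (n:Int) 2 _ [c0, c1] 0 [] (-1)
        ⟨List.ne_nil_of_length_pos (by rw [l0]; omega),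
         by rw [PySem.Int.floordiv_eq_ediv_of_pos (by norm_num), l0]; push_cast; omega,
         List.ne_nil_of_length_pos (by rw [l1]; omega),
         by rw [PySem.Int.floordiv_eq_ediv_of_pos (by norm_num), l0, l1]; push_cast; omega,
         trivial⟩]
      have hbz : ¬ (b1 = 0) := by omega
      simp [glue, l0, hbz, hdc1, List.append_assoc, PySem.List.pyGetD, PySem.List.pyGet?, PySem.List.pyIdx?]
    -- S = 3
    · have hh : PySem.List.slice (["## Introduction", "## Key Ideas", "## Technical Insights", "## Applications", "## Conclusion"] : List String) none (some 3) = ["## Introduction", "## Key Ideas", "## Technical Insights"] := by decide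
      simp only [List.length_cons, List.length_nil]
      norm_num [hh, PySem.List.enumerate]
      have hc1 : ((n : Int) / 3) = ((n / 3 : Nat) : Int) := by omega
      have hc2 : ((n : Int) * 2 / 3) = ((n * 2 / 3 : Nat) : Int) := by omega
      set b1 := n / 3 with hb1
      set b2 := n * 2 / 3 with hb2
      set c0 := paragraphs.take b1 with hdc0
      set c1 := (paragraphs.drop b1).take (b2 - b1) with hdc1
      set c2 := (paragraphs.drop b2).take (n - b2) with hdc2
      have l0 : c0.length = b1 := by simp [hdc0, hn]; try omega
      have l1 : c1.length = b2 - b1 := by simp [hdc1, hn]; try omega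
      have l2 : c2.length = n - b2 := by simp [hdc2, hn]; try omega
      have hflat : ([c0, c1, c2] : List (List String)).flatten = paragraphs := by
        simp only [List.flatten_cons, List.flatten_nil, List.append_nil]
        rw [hdc0, hdc1, hdc2, show (paragraphs.drop b2).take (n - b2) = paragraphs.drop b2 from
          List.take_of_length_le (by simp [hn])]
        rw [← drop_split paragraphs b1 b2 (by omega)]
        exact List.take_append_drop b1 paragraphs
      rw [hc1, hc2, PySem.List.slice_to_natCast]
      simp only [PySem.List.slice_natCast]
      rw [← hdc0]
      conv_rhs => rw [← hflat, ← h00]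
      rw [bstep_chunks (n:Int) 3 _ [c0, c1, c2] 0 [] (-1)
        ⟨List.ne_nil_of_length_pos (by rw [l0]; omega),
         by rw [PySem.Int.floordiv_eq_ediv_of_pos (by norm_num), l0]; push_cast; omega,
         List.ne_nil_of_length_pos (by rw [l1]; omega),
         by rw [PySem.Int.floordiv_eq_ediv_of_pos (by norm_num), l0, l1]; push_cast; omega,
         List.ne_nil_of_length_pos (by rw [l2]; omega),
         by rw [PySem.Int.floordiv_eq_ediv_of_pos (by norm_num), l0, l1, l2]; push_cast; omega,
         trivial⟩]
      have hle1 : b1 ≤ b2 := by omega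
      have hz1 : b1 ≠ 0 := by omega
      have hz2 : b2 ≠ 0 := by omega
      simp [glue, l0, l1, l2, Nat.add_sub_cancel' hle1, hz1, hz2, hdc1, hdc2, List.append_assoc, PySem.List.pyGetD, PySem.List.pyGet?, PySem.List.pyIdx?]
    -- S = 4
    · have hh : PySem.List.slice (["## Introduction", "## Key Ideas", "## Technical Insights", "## Applications", "## Conclusion"] : List String) none (some 4) = ["## Introduction", "## Key Ideas", "## Technical Insights", "## Applications"] := by decide
      simp only [List.length_cons, List.length_nil]
      norm_num [hh, PySem.List.enumerate]
      have hc1 : ((n : Int) / 4) = ((n / 4 : Nat) : Int) := by omega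
      have hc2 : ((n : Int) * 2 / 4) = ((n * 2 / 4 : Nat) : Int) := by omega
      have hc3 : ((n : Int) * 3 / 4) = ((n * 3 / 4 : Nat) : Int) := by omega
      set b1 := n / 4 with hb1
      set b2 := n * 2 / 4 with hb2
      set b3 := n * 3 / 4 with hb3
      set c0 := paragraphs.take b1 with hdc0
      set c1 := (paragraphs.drop b1).take (b2 - b1) with hdc1
      set c2 := (paragraphs.drop b2).take (b3 - b2) with hdc2
      set c3 := (paragraphs.drop b3).take (n - b3) with hdc3
      have l0 : c0.length = b1 := by simp [hdc0, hn]; try omega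
      have l1 : c1.length = b2 - b1 := by simp [hdc1, hn]; try omega
      have l2 : c2.length = b3 - b2 := by simp [hdc2, hn]; try omega
      have l3 : c3.length = n - b3 := by simp [hdc3, hn]; try omega
      have hflat : ([c0, c1, c2, c3] : List (List String)).flatten = paragraphs := by
        simp only [List.flatten_cons, List.flatten_nil, List.append_nil]
        rw [hdc0, hdc1, hdc2, hdc3, show (paragraphs.drop b3).take (n - b3) = paragraphs.drop b3 from
          List.take_of_length_le (by simp [hn])]
        rw [← drop_split paragraphs b2 b3 (by omega)]
        rw [← drop_split paragraphs b1 b2 (by omega)]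
        exact List.take_append_drop b1 paragraphs
      rw [hc1, hc2, hc3, PySem.List.slice_to_natCast]
      simp only [PySem.List.slice_natCast]
      rw [← hdc0]
      conv_rhs => rw [← hflat, ← h00]
      rw [bstep_chunks (n:Int) 4 _ [c0, c1, c2, c3] 0 [] (-1)
        ⟨List.ne_nil_of_length_pos (by rw [l0]; omega),
         by rw [PySem.Int.floordiv_eq_ediv_of_pos (by norm_num), l0]; push_cast; omega,
         List.ne_nil_of_length_pos (by rw [l1]; omega),
         by rw [PySem.Int.floordiv_eq_ediv_of_pos (by norm_num), l0, l1]; push_cast; omega,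
         List.ne_nil_of_length_pos (by rw [l2]; omega),
         by rw [PySem.Int.floordiv_eq_ediv_of_pos (by norm_num), l0, l1, l2]; push_cast; omega,
         List.ne_nil_of_length_pos (by rw [l3]; omega),
         by rw [PySem.Int.floordiv_eq_ediv_of_pos (by norm_num), l0, l1, l2, l3]; push_cast; omega,
         trivial⟩]
      have hle1 : b1 ≤ b2 := by omega
      have hle2 : b2 ≤ b3 := by omega
      have hz1 : b1 ≠ 0 := by omega
      have hz2 : b2 ≠ 0 := by omega
      have hz3 : b3 ≠ 0 := by omega
      simp [glue, l0, l1, l2, l3, Nat.add_sub_cancel' hle1, Nat.add_sub_cancel' hle2, hz1, hz2, hz3, hdc1, hdc2, hdc3, List.append_assoc, PySem.List.pyGetD, PySem.List.pyGet?, PySem.List.pyIdx?]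
    -- S = 5
    · have hh : PySem.List.slice (["## Introduction", "## Key Ideas", "## Technical Insights", "## Applications", "## Conclusion"] : List String) none (some 5) = ["## Introduction", "## Key Ideas", "## Technical Insights", "## Applications", "## Conclusion"] := by decide
      simp only [List.length_cons, List.length_nil]
      norm_num [hh, PySem.List.enumerate]
      have hc1 : ((n : Int) / 5) = ((n / 5 : Nat) : Int) := by omega
      have hc2 : ((n : Int) * 2 / 5) = ((n * 2 / 5 : Nat) : Int) := by omega
      have hc3 : ((n : Int) * 3 / 5) = ((n * 3 / 5 : Nat) : Int) := by omega
      have hc4 : ((n : Int) * 4 / 5) = ((n * 4 / 5 : Nat) : Int) := by omega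
      set b1 := n / 5 with hb1
      set b2 := n * 2 / 5 with hb2
      set b3 := n * 3 / 5 with hb3
      set b4 := n * 4 / 5 with hb4
      set c0 := paragraphs.take b1 with hdc0
      set c1 := (paragraphs.drop b1).take (b2 - b1) with hdc1
      set c2 := (paragraphs.drop b2).take (b3 - b2) with hdc2
      set c3 := (paragraphs.drop b3).take (b4 - b3) with hdc3
      set c4 := (paragraphs.drop b4).take (n - b4) with hdc4
      have l0 : c0.length = b1 := by simp [hdc0, hn]; try omega
      have l1 : c1.length = b2 - b1 := by simp [hdc1, hn]; try omega
      have l2 : c2.length = b3 - b2 := by simp [hdc2, hn]; try omega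
      have l3 : c3.length = b4 - b3 := by simp [hdc3, hn]; try omega
      have l4 : c4.length = n - b4 := by simp [hdc4, hn]; try omega
      have hflat : ([c0, c1, c2, c3, c4] : List (List String)).flatten = paragraphs := by
        simp only [List.flatten_cons, List.flatten_nil, List.append_nil]
        rw [hdc0, hdc1, hdc2, hdc3, hdc4, show (paragraphs.drop b4).take (n - b4) = paragraphs.drop b4 from
          List.take_of_length_le (by simp [hn])]
        rw [← drop_split paragraphs b3 b4 (by omega)]
        rw [← drop_split paragraphs b2 b3 (by omega)]
        rw [← drop_split paragraphs b1 b2 (by omega)]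
        exact List.take_append_drop b1 paragraphs
      rw [hc1, hc2, hc3, hc4, PySem.List.slice_to_natCast]
      simp only [PySem.List.slice_natCast]
      rw [← hdc0]
      conv_rhs => rw [← hflat, ← h00]
      rw [bstep_chunks (n:Int) 5 _ [c0, c1, c2, c3, c4] 0 [] (-1)
        ⟨List.ne_nil_of_length_pos (by rw [l0]; omega),
         by rw [PySem.Int.floordiv_eq_ediv_of_pos (by norm_num), l0]; push_cast; omega,
         List.ne_nil_of_length_pos (by rw [l1]; omega),
         by rw [PySem.Int.floordiv_eq_ediv_of_pos (by norm_num), l0, l1]; push_cast; omega,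
         List.ne_nil_of_length_pos (by rw [l2]; omega),
         by rw [PySem.Int.floordiv_eq_ediv_of_pos (by norm_num), l0, l1, l2]; push_cast; omega,
         List.ne_nil_of_length_pos (by rw [l3]; omega),
         by rw [PySem.Int.floordiv_eq_ediv_of_pos (by norm_num), l0, l1, l2, l3]; push_cast; omega,
         List.ne_nil_of_length_pos (by rw [l4]; omega),
         by rw [PySem.Int.floordiv_eq_ediv_of_pos (by norm_num), l0, l1, l2, l3, l4]; push_cast; omega,
         trivial⟩]
      have hle1 : b1 ≤ b2 := by omega
      have hle2 : b2 ≤ b3 := by omega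
      have hle3 : b3 ≤ b4 := by omega
      have hz1 : b1 ≠ 0 := by omega
      have hz2 : b2 ≠ 0 := by omega
      have hz3 : b3 ≠ 0 := by omega
      have hz4 : b4 ≠ 0 := by omega
      simp [glue, l0, l1, l2, l3, l4, Nat.add_sub_cancel' hle1, Nat.add_sub_cancel' hle2, Nat.add_sub_cancel' hle3, hz1, hz2, hz3, hz4, hdc1, hdc2, hdc3, hdc4, List.append_assoc, PySem.List.pyGetD, PySem.List.pyGet?, PySem.List.pyIdx?]

-- ===== VERDICT (by name: the statement is the Claim_ definition above) =====
theorem add_subheadings_spec : Claim_equal_add_subheadings := by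
  intro paragraphs _
  exact add_subheadings_eq_alt paragraphs
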